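-- pv_equiv track=rewrite | github.com/houtianze/bypy | bypy.py | limit_unit
-- ===== SOURCE A (Python) =====
-- def limit_unit(timestr, num = 2):
-- 	''' DocTests:
-- 	>>> limit_unit('1m2s', 1) == '1m'
-- 	True
-- 	>>> limit_unit('1m2s') == '1m2s'
-- 	True
-- 	>>> limit_unit('1m2s', 4) == '1m2s'
-- 	True
-- 	>>> limit_unit('1d2h3m2s') == '1d2h'
-- 	True
-- 	>>> limit_unit('1d2h3m2s', 1) == '1d'
-- 	True
-- 	'''
-- 	l = len(timestr)
-- 	i = 0
-- 	p = 0
-- 	while i < num and p <= l: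
-- 		at = 0
-- 		while p < l:
-- 			c = timestr[p]
-- 			if at == 0:
-- 				if c.isdigit():
-- 					p += 1
-- 				else:
-- 					at += 1
-- 			elif at == 1:
-- 				if not c.isdigit():
-- 					p += 1
-- 				else:
-- 					at += 1
-- 			else:
-- 				break
--
-- 		i += 1
--
-- 	return timestr[:p]
-- ===== SOURCE B (Python) =====
-- def limit_unit(timestr, num = 2):
--     out = []
--     count = 0          # units started so far
--     prev_digit = False
--     first = True
--     for c in timestr:
--         is_d = c.isdigit()
--         if first or (is_d and not prev_digit):
--             count += 1
--         if count > num: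
--             break
--         out.append(c)
--         prev_digit = is_d
--         first = False
--     return ''.join(out)
-- ===== Notes on version B (the rewrite author's own statement) =====
-- stated objective: simpler
-- what changed: A's nested while loops (an outer per-unit loop re-running a 3-state inner index scanner) are replaced by a single forward pass over the characters that counts unit starts (first char, or digit right after a non-digit) and breaks as soon as more than num units have started.
import Mathlib
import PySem

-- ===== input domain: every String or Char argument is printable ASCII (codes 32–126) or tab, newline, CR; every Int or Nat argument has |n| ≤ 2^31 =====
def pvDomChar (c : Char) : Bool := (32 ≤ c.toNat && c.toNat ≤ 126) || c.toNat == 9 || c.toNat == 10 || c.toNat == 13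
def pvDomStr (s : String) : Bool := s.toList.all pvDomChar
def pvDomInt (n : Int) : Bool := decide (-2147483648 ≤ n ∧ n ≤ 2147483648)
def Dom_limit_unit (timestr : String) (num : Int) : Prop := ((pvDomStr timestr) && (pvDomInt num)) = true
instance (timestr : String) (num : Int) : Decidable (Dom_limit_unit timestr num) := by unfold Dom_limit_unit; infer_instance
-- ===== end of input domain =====

-- B replaces A's nested index-driven while loops by one forward pass that counts
-- unit starts and stops once more than num units have begun (objective: simpler).

-- ===== PORT A =====
-- inner 'while p < l' loop of A: state 'at' (0 = skipping digits, 1 = skipping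
-- non-digits, 2 = break) and index p; returns the final p
def limit_unit_inner (cs : List Char) (at_ : Nat) (p : Nat) : Nat :=
  if h : p < cs.length then        -- c = timestr[p] is cs[p]
    if at_ = 0 then
      if PySem.Chars.isdigit cs[p] then limit_unit_inner cs at_ (p + 1)
      else limit_unit_inner cs (at_ + 1) p
    else if at_ = 1 then
      if ¬ PySem.Chars.isdigit cs[p] then limit_unit_inner cs at_ (p + 1)
      else limit_unit_inner cs (at_ + 1) p
    else p                          -- at ≥ 2: break
  else p
termination_by (cs.length - p, 2 - at_)
decreasing_by all_goals simp_all; omega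

-- outer 'while i < num and p <= l' loop of A
def limit_unit_outer (cs : List Char) (num : Int) (i : Int) (p : Nat) : Nat :=
  if i < num ∧ p ≤ cs.length then
    limit_unit_outer cs num (i + 1) (limit_unit_inner cs 0 p)
  else p
termination_by (num - i).toNat
decreasing_by omega

def limit_unit (timestr : String) (num : Int) : String :=
  let cs := timestr.toList
  PySem.Str.slice timestr none (some ((limit_unit_outer cs num 0 0 : Nat) : Int))  -- timestr[:p]

-- ===== PORT B =====
-- B's single for-loop: out is accumulated by the recursion; 'break' returns []
def limit_unit_go (num count : Int) (prev first : Bool) : List Char → List Char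
  | [] => []
  | c :: rest =>
    let isd := PySem.Chars.isdigit c
    let count' := if first || (isd && !prev) then count + 1 else count
    if num < count' then []          -- count' > num: break
    else c :: limit_unit_go num count' isd false rest

def limit_unit_alt (timestr : String) (num : Int) : String :=
  String.ofList (limit_unit_go num 0 false true timestr.toList)  -- ''.join(out)

-- ===== PRECONDITION & SPEC =====
def Spec_limit_unit (timestr : String) (num : Int) (out : String) : Prop := out = limit_unit_alt timestr num
instance (timestr : String) (num : Int) (out : String) : Decidable (Spec_limit_unit timestr num out) := by unfold Spec_limit_unit; infer_instance

-- ===== CLAIM (what is proved, stated in full; the proofs are below) =====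
def Claim_equal_limit_unit : Prop := ∀ (timestr : String) (num : Int), Dom_limit_unit timestr num → Spec_limit_unit timestr num (limit_unit timestr num)

-- ===== LEMMAS AND PROOFS =====

-- length of one "unit" at the front of l: a run of digits followed by a run of non-digits
def unitLen (l : List Char) : Nat :=
  (l.takeWhile PySem.Chars.isdigit).length +
  ((l.dropWhile PySem.Chars.isdigit).takeWhile (fun c => !PySem.Chars.isdigit c)).length

-- how many characters the first n units of l occupy
def cutRem : Nat → List Char → Nat
  | 0, _ => 0
  | n + 1, l => unitLen l + cutRem n (l.drop (unitLen l))

theorem unitLen_le (l : List Char) : unitLen l ≤ l.length := by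
  have h1 := congrArg List.length
    (List.takeWhile_append_dropWhile (p := PySem.Chars.isdigit) (l := l))
  simp only [List.length_append] at h1
  have h2 := congrArg List.length
    (List.takeWhile_append_dropWhile (p := fun c => !PySem.Chars.isdigit c)
      (l := l.dropWhile PySem.Chars.isdigit))
  simp only [List.length_append] at h2
  unfold unitLen; omega

theorem inner_ge (cs : List Char) (a p : Nat) (h : ¬ p < cs.length) :
    limit_unit_inner cs a p = p := by
  rw [limit_unit_inner, dif_neg h]

theorem inner2 (cs : List Char) (p : Nat) : limit_unit_inner cs 2 p = p := by
  rw [limit_unit_inner]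
  split
  · simp
  · rfl

theorem inner0_d (cs : List Char) (p : Nat) (h : p < cs.length)
    (hd : PySem.Chars.isdigit cs[p] = true) :
    limit_unit_inner cs 0 p = limit_unit_inner cs 0 (p + 1) := by
  conv_lhs => rw [limit_unit_inner]
  rw [dif_pos h]; simp [hd]

theorem inner0_nd (cs : List Char) (p : Nat) (h : p < cs.length)
    (hd : PySem.Chars.isdigit cs[p] = false) :
    limit_unit_inner cs 0 p = limit_unit_inner cs 1 p := by
  conv_lhs => rw [limit_unit_inner]
  rw [dif_pos h]; simp [hd]

theorem inner1_nd (cs : List Char) (p : Nat) (h : p < cs.length)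
    (hd : PySem.Chars.isdigit cs[p] = false) :
    limit_unit_inner cs 1 p = limit_unit_inner cs 1 (p + 1) := by
  conv_lhs => rw [limit_unit_inner]
  rw [dif_pos h]; simp [hd]

theorem inner1_d (cs : List Char) (p : Nat) (h : p < cs.length)
    (hd : PySem.Chars.isdigit cs[p] = true) :
    limit_unit_inner cs 1 p = p := by
  conv_lhs => rw [limit_unit_inner]
  rw [dif_pos h]; simp [hd, inner2]

theorem inner1_eq (cs : List Char) :
    ∀ (k p : Nat), cs.length - p ≤ k →
    limit_unit_inner cs 1 p =
      p + ((cs.drop p).takeWhile (fun c => !PySem.Chars.isdigit c)).length := by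
  intro k
  induction k with
  | zero =>
    intro p hp
    rw [inner_ge cs 1 p (by omega), List.drop_eq_nil_of_le (by omega)]
    simp
  | succ k ih =>
    intro p hp
    by_cases h : p < cs.length
    · have hdrop : cs.drop p = cs[p] :: cs.drop (p + 1) := List.drop_eq_getElem_cons h
      by_cases hd : PySem.Chars.isdigit cs[p]
      · rw [inner1_d cs p h hd, hdrop, List.takeWhile_cons_of_neg (by simp [hd])]
        simp
      · rw [inner1_nd cs p h (by simpa using hd), ih (p + 1) (by omega), hdrop,
            List.takeWhile_cons_of_pos (by simp [hd])]
        simp; omega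
    · rw [inner_ge cs 1 p h, List.drop_eq_nil_of_le (by omega)]
      simp

theorem inner0_eq (cs : List Char) (p : Nat) :
    limit_unit_inner cs 0 p = p + unitLen (cs.drop p) := by
  generalize hk : cs.length - p = k
  induction k generalizing p with
  | zero =>
    rw [inner_ge cs 0 p (by omega), List.drop_eq_nil_of_le (by omega)]
    simp [unitLen]
  | succ k ih =>
    by_cases h : p < cs.length
    · have hdrop : cs.drop p = cs[p] :: cs.drop (p + 1) := List.drop_eq_getElem_cons h
      by_cases hd : PySem.Chars.isdigit cs[p]
      · rw [inner0_d cs p h hd, ih (p + 1) (by omega), hdrop]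
        simp only [unitLen, List.takeWhile_cons_of_pos hd, List.dropWhile_cons_of_pos hd]
        simp; omega
      · have ht : List.takeWhile PySem.Chars.isdigit (cs[p] :: cs.drop (p + 1)) = [] := by
          rw [List.takeWhile_cons_of_neg (by simpa using hd)]
        have hw : List.dropWhile PySem.Chars.isdigit (cs[p] :: cs.drop (p + 1))
            = cs[p] :: cs.drop (p + 1) := by
          rw [List.dropWhile_cons_of_neg (by simpa using hd)]
        rw [inner0_nd cs p h (by simpa using hd),
            inner1_eq cs cs.length p (by omega), hdrop]
        simp only [unitLen, ht, hw]
        simp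
    · rw [inner_ge cs 0 p h, List.drop_eq_nil_of_le (by omega)]
      simp [unitLen]

theorem outer_eq (cs : List Char) :
    ∀ (n : Nat) (i : Int) (p : Nat), p ≤ cs.length →
    limit_unit_outer cs (i + n) i p = p + cutRem n (cs.drop p) := by
  intro n
  induction n with
  | zero =>
    intro i p hp
    rw [limit_unit_outer, if_neg (by omega)]
    simp [cutRem]
  | succ n ih =>
    intro i p hp
    rw [limit_unit_outer, if_pos (by constructor <;> omega)]
    rw [inner0_eq cs p]
    have hle : unitLen (cs.drop p) ≤ cs.length - p := by
      have := unitLen_le (cs.drop p)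
      simpa using this
    have h2 := ih (i + 1) (p + unitLen (cs.drop p)) (by omega)
    have h3 : i + ((n + 1 : Nat) : Int) = i + 1 + (n : Int) := by push_cast; ring
    rw [h3, h2]
    have h4 : cs.drop (p + unitLen (cs.drop p)) = (cs.drop p).drop (unitLen (cs.drop p)) := by
      rw [List.drop_drop]
    rw [h4]
    simp [cutRem]
    omega

theorem A_cut (cs : List Char) (num : Int) :
    limit_unit_outer cs num 0 0 = cutRem num.toNat cs := by
  rcases (by omega : 0 ≤ num ∨ num < 0) with hnn | hneg
  · have h := outer_eq cs num.toNat 0 0 (by omega)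
    rw [(by omega : (0:Int) + (num.toNat : Int) = num)] at h
    simpa using h
  · rw [limit_unit_outer, if_neg (by omega)]
    rw [(by omega : num.toNat = 0)]
    simp [cutRem]

theorem go_nd (num count : Int) :
    ∀ (ns rest : List Char) (prev : Bool),
      (∀ c ∈ ns, PySem.Chars.isdigit c = false) → ¬ num < count →
      limit_unit_go num count prev false (ns ++ rest) =
        ns ++ limit_unit_go num count (prev && ns.isEmpty) false rest := by
  intro ns
  induction ns with
  | nil => intro rest prev _ _; simp
  | cons c t ih =>
    intro rest prev hall hle
    have hc : PySem.Chars.isdigit c = false := hall c (by simp)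
    simp only [List.cons_append, limit_unit_go, hc]
    have h1 : (if (false || (false && !prev)) = true then count + 1 else count) = count := by
      simp
    rw [h1, if_neg (by simpa using hle)]
    simp only [List.isEmpty_cons, Bool.and_false]
    rw [ih rest false (fun x hx => hall x (by simp [hx])) hle]
    simp

theorem go_d (num count : Int) :
    ∀ (ds rest : List Char),
      (∀ c ∈ ds, PySem.Chars.isdigit c = true) → ¬ num < count →
      limit_unit_go num count true false (ds ++ rest) =
        ds ++ limit_unit_go num count true false rest := by
  intro ds
  induction ds with
  | nil => intro rest _ _; simp
  | cons c t ih =>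
    intro rest hall hle
    have hc : PySem.Chars.isdigit c = true := hall c (by simp)
    simp only [List.cons_append, limit_unit_go, hc]
    have h1 : (if (false || (true && !true)) = true then count + 1 else count) = count := by
      simp
    rw [h1, if_neg (by simpa using hle)]
    rw [ih rest (fun x hx => hall x (by simp [hx])) hle]

theorem head_dropWhile {p : Char → Bool} :
    ∀ (l : List Char) (c : Char), (l.dropWhile p).head? = some c → p c = false := by
  intro l
  induction l with
  | nil => intro c h; simp at h
  | cons a t ih =>
    intro c h
    by_cases hp : p a
    · rw [List.dropWhile_cons_of_pos hp] at h; exact ih c h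
    · rw [List.dropWhile_cons_of_neg hp] at h
      simp at h
      subst h
      simpa using hp

theorem go_main (num : Int) :
    ∀ (fuel : Nat) (l : List Char), l.length ≤ fuel → ∀ (n : Nat) (count : Int) (first : Bool),
      count + n = num →
      (first = false → ∀ c, l.head? = some c → PySem.Chars.isdigit c = true) →
      limit_unit_go num count false first l = l.take (cutRem n l) := by
  intro fuel
  induction fuel with
  | zero =>
    intro l hl n count first _ _
    have : l = [] := List.eq_nil_of_length_eq_zero (by omega)
    subst this
    simp [limit_unit_go]
  | succ fuel ih =>
    intro l hl n count first hcount hfirst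
    cases l with
    | nil => simp [limit_unit_go]
    | cons c t =>
      have hstart : (first || (PySem.Chars.isdigit c && !false)) = true := by
        cases hf : first with
        | true => simp
        | false =>
          have := hfirst hf c (by simp)
          simp [this]
      rw [limit_unit_go]
      simp only [hstart, if_true]
      cases n with
      | zero =>
        rw [if_pos (by omega)]
        simp [cutRem]
      | succ m =>
        rw [if_neg (by omega)]
        have hnlt : ¬ num < count + 1 := by omega
        by_cases hdc : PySem.Chars.isdigit c = true
        · -- unit starts with a digit run
          set A := t.takeWhile PySem.Chars.isdigit with hA
          set r := t.dropWhile PySem.Chars.isdigit with hr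
          set B := r.takeWhile (fun c => !PySem.Chars.isdigit c) with hB
          set r' := r.dropWhile (fun c => !PySem.Chars.isdigit c) with hr'
          have ht : t = A ++ r := (List.takeWhile_append_dropWhile ..).symm
          have hrs : r = B ++ r' := (List.takeWhile_append_dropWhile ..).symm
          have hgo1 : limit_unit_go num (count + 1) (PySem.Chars.isdigit c) false t
              = A ++ (B ++ limit_unit_go num (count + 1) (true && B.isEmpty) false r') := by
            rw [hdc, ht, go_d num (count + 1) A r
                (fun x hx => List.mem_takeWhile_imp hx) hnlt]
            rw [hrs, go_nd num (count + 1) B r' true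
                (fun x hx => by simpa using List.mem_takeWhile_imp hx) hnlt]
          have hprev : limit_unit_go num (count + 1) (true && B.isEmpty) false r'
              = limit_unit_go num (count + 1) false false r' := by
            cases hBe : B.isEmpty with
            | false => simp
            | true =>
              have hrnil : r = [] := by
                cases hcase : r with
                | nil => rfl
                | cons x xs =>
                  have hx : PySem.Chars.isdigit x = false :=
                    head_dropWhile t x (by rw [← hr, hcase]; rfl)
                  rw [hcase] at hB
                  rw [List.takeWhile_cons_of_pos (by simp [hx])] at hB
                  rw [hB] at hBe
                  simp at hBe
              have : r' = [] := by rw [hr', hrnil]; rfl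
              rw [this]
              simp [limit_unit_go]
          have hlen : r'.length ≤ fuel := by
            have h1 := congrArg List.length ht
            have h2 := congrArg List.length hrs
            simp only [List.length_append] at h1 h2
            simp only [List.length_cons] at hl
            omega
          have hrec : limit_unit_go num (count + 1) false false r'
              = r'.take (cutRem m r') := by
            apply ih r' hlen m (count + 1) false (by omega)
            intro _ x hx
            have := head_dropWhile r x hx
            simpa using this
          have hP : c :: t = (c :: (A ++ B)) ++ r' := by
            rw [ht, hrs]; simp
          have hunit : unitLen (c :: t) = (c :: (A ++ B)).length := by
            simp only [unitLen, List.takeWhile_cons_of_pos hdc,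
              List.dropWhile_cons_of_pos hdc, ← hA, ← hr, ← hB]
            simp
            omega
          have hdropu : (c :: t).drop ((c :: (A ++ B)).length) = r' := by
            conv_lhs => rw [hP]
            rw [show (c :: (A ++ B)).length = (c :: (A ++ B)).length + 0 from by omega]
            rw [List.drop_length_add_append]
            rfl
          rw [hgo1, hprev, hrec]
          show (c :: (A ++ (B ++ r'.take (cutRem m r')))) = _
          rw [cutRem, hunit, hdropu]
          conv_rhs => rw [hP]
          rw [List.take_length_add_append]
          simp
        · -- no digits: the whole unit is the leading non-digit run
          have hdcf : PySem.Chars.isdigit c = false := by simpa using hdc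
          set B := t.takeWhile (fun c => !PySem.Chars.isdigit c) with hB
          set r' := t.dropWhile (fun c => !PySem.Chars.isdigit c) with hr'
          have ht : t = B ++ r' := (List.takeWhile_append_dropWhile ..).symm
          have hgo1 : limit_unit_go num (count + 1) (PySem.Chars.isdigit c) false t
              = B ++ limit_unit_go num (count + 1) false false r' := by
            rw [hdcf, ht, go_nd num (count + 1) B r' false
                (fun x hx => by simpa using List.mem_takeWhile_imp hx) hnlt]
            simp
          have hlen : r'.length ≤ fuel := by
            have h1 := congrArg List.length ht
            simp only [List.length_append] at h1
            simp only [List.length_cons] at hl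
            omega
          have hrec : limit_unit_go num (count + 1) false false r'
              = r'.take (cutRem m r') := by
            apply ih r' hlen m (count + 1) false (by omega)
            intro _ x hx
            have := head_dropWhile t x hx
            simpa using this
          have hP : c :: t = (c :: B) ++ r' := by rw [ht]; simp
          have h1 : List.takeWhile PySem.Chars.isdigit (c :: t) = [] :=
            List.takeWhile_cons_of_neg (by simp [hdcf])
          have h2 : List.dropWhile PySem.Chars.isdigit (c :: t) = c :: t :=
            List.dropWhile_cons_of_neg (by simp [hdcf])
          have h3 : List.takeWhile (fun x => !PySem.Chars.isdigit x) (c :: t) = c :: B := by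
            rw [List.takeWhile_cons_of_pos (by simp [hdcf])]
          have hunit : unitLen (c :: t) = (c :: B).length := by
            simp only [unitLen, h1, h2, h3]
            simp
          have hdropu : (c :: t).drop ((c :: B).length) = r' := by
            conv_lhs => rw [hP]
            rw [show (c :: B).length = (c :: B).length + 0 from by omega]
            rw [List.drop_length_add_append]
            rfl
          rw [hgo1, hrec]
          show (c :: (B ++ r'.take (cutRem m r'))) = _
          rw [cutRem, hunit, hdropu]
          conv_rhs => rw [hP]
          rw [List.take_length_add_append]
          simp

-- ===== VERDICT (by name: the statement is the Claim_ definition above) =====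
theorem limit_unit_spec : Claim_equal_limit_unit := by
  intro timestr num _
  unfold Spec_limit_unit limit_unit limit_unit_alt
  have hA : (PySem.Str.slice timestr none
      (some ((limit_unit_outer timestr.toList num 0 0 : Nat) : Int))).toList
      = timestr.toList.take (limit_unit_outer timestr.toList num 0 0) := by
    simp [PySem.List.slice_to_natCast]
  have hB : limit_unit_go num 0 false true timestr.toList
      = timestr.toList.take (cutRem num.toNat timestr.toList) := by
    rcases (by omega : 0 ≤ num ∨ num < 0) with hnn | hneg
    · exact go_main num timestr.toList.length timestr.toList le_rfl num.toNat 0 true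
        (by omega) (by intro h; exact absurd h (by simp))
    · have : num.toNat = 0 := by omega
      rw [this]
      cases timestr.toList with
      | nil => simp [limit_unit_go]
      | cons c t =>
        simp only [limit_unit_go, cutRem, List.take_zero]
        rw [if_pos (by simp; omega)]
  apply String.toList_inj.mp
  rw [hA, hB, A_cut]
  simp
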